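-- pv_equiv track=rewrite | github.com/StBogdan/PythonWork | Leetcode/1291.py | get_next_seq
-- ===== SOURCE A (Python) =====
-- def get_next_seq(prev, is_curn_perf=True):
--     str_prev = str(prev)
--     n = len(str_prev)
--     fd = int(str_prev[0])
--
--     curn = 0
--     if (is_curn_perf and '9' in str_prev) or fd + n > 10:
--         n += 1
--         fd = 1
--     else:
--         if is_curn_perf:
--             fd += 1
--
--     for i in range(n-1, -1, -1):
--         curn += fd*(10**i)
--         fd += 1
--
--     return curn
-- ===== SOURCE B (Python) =====
-- def get_next_seq(prev, is_curn_perf=True):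
--     s = str(prev)
--     n = len(s)
--     fd = int(s[0])
--     if (is_curn_perf and '9' in s) or fd + n > 10:
--         n += 1
--         fd = 1
--     elif is_curn_perf:
--         fd += 1
--     # closed form of sum_{k=0}^{n-1} (fd+k)*10**(n-1-k) -- no loop:
--     rep = (10**n - 1) // 9                    # repunit 11...1 (n ones)
--     t = ((9*n - 10) * 10**n + 10) // 81       # sum_{i=0}^{n-1} i*10**i
--     return (fd + n - 1) * rep - t
-- ===== Notes on version B (the rewrite author's own statement) =====
-- stated objective: simpler
-- what changed: B keeps A's branch logic for the starting digit and length but replaces the positional for-loop (digit-by-digit accumulation with an incrementing digit) by a closed-form repunit formula: result = (fd+n-1)*((10^n-1)//9) - ((9n-10)*10^n+10)//81, so no loop at all.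
import Mathlib
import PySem

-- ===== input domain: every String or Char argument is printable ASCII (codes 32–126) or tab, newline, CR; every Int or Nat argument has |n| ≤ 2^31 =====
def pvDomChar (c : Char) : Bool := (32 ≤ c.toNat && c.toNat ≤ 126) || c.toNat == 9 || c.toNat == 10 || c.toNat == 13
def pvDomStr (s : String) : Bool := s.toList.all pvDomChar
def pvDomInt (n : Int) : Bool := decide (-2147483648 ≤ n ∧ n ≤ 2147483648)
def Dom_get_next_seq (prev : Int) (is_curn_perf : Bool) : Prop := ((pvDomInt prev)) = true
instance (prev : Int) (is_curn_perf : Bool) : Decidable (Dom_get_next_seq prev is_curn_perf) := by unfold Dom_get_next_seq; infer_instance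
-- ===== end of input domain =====

-- B replaces A's positional for-loop by a closed-form repunit formula (objective: simpler, no loop).

-- ===== PORT A =====
def get_next_seq (prev : Int) (is_curn_perf : Bool) : Int :=
  let str_prev := PySem.Int.toStr prev
  let n : Int := PySem.Str.len str_prev
  -- int(str_prev[0]); ValueError (prev < 0, first char '-') is excluded by Pre_, .getD 0 is never used there
  let fd : Int := ((PySem.Str.pyGet? str_prev 0).bind (fun c => PySem.Int.ofChars? [c])).getD 0
  let curn : Int := 0
  let nfd : Int × Int :=
    if (is_curn_perf && PySem.Str.isIn "9" str_prev) || decide (fd + n > 10) then (n + 1, 1)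
    else (n, if is_curn_perf then fd + 1 else fd)
  -- for i in range(n-1, -1, -1): curn += fd*(10**i); fd += 1   (i ≥ 0 throughout, so 10**i = 10 ^ i.toNat exactly)
  ((PySem.List.pyRange (nfd.1 - 1) (-1) (-1)).foldl
      (fun (st : Int × Int) i => (st.1 + st.2 * 10 ^ i.toNat, st.2 + 1)) (curn, nfd.2)).1

-- ===== PORT B =====
def get_next_seq_alt (prev : Int) (is_curn_perf : Bool) : Int :=
  let s := PySem.Int.toStr prev
  let n : Int := PySem.Str.len s
  let fd : Int := ((PySem.Str.pyGet? s 0).bind (fun c => PySem.Int.ofChars? [c])).getD 0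
  let nfd : Int × Int :=
    if (is_curn_perf && PySem.Str.isIn "9" s) || decide (fd + n > 10) then (n + 1, 1)
    else (n, if is_curn_perf then fd + 1 else fd)
  -- closed form of sum_{k=0}^{n-1} (fd+k)*10**(n-1-k); n ≥ 0 so 10**n = 10 ^ n.toNat exactly
  let rep : Int := PySem.Int.floordiv (10 ^ nfd.1.toNat - 1) 9
  let t : Int := PySem.Int.floordiv ((9 * nfd.1 - 10) * 10 ^ nfd.1.toNat + 10) 81
  (nfd.2 + nfd.1 - 1) * rep - t

-- ===== PRECONDITION & SPEC =====
-- Pre_ excludes exactly prev < 0: there str(prev) starts with '-' and int(str_prev[0]) raises ValueError in A (and in B alike).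
def Pre_get_next_seq (prev : Int) (is_curn_perf : Bool) : Prop := 0 ≤ prev
instance (prev : Int) (is_curn_perf : Bool) : Decidable (Pre_get_next_seq prev is_curn_perf) := by unfold Pre_get_next_seq; infer_instance
def pvWitness_get_next_seq : Int × Bool := (45, true)
def Spec_get_next_seq (prev : Int) (is_curn_perf : Bool) (out : Int) : Prop := out = get_next_seq_alt prev is_curn_perf
instance (prev : Int) (is_curn_perf : Bool) (out : Int) : Decidable (Spec_get_next_seq prev is_curn_perf out) := by unfold Spec_get_next_seq; infer_instance

-- ===== CLAIM (what is proved, stated in full; the proofs are below) =====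
def Claim_equal_get_next_seq : Prop := ∀ (prev : Int) (is_curn_perf : Bool), Dom_get_next_seq prev is_curn_perf → Pre_get_next_seq prev is_curn_perf → Spec_get_next_seq prev is_curn_perf (get_next_seq prev is_curn_perf)

-- ===== LEMMAS AND PROOFS =====

-- repunit with m ones, and sum_{i<m} i*10^i
def pvRep : Nat → Int
  | 0 => 0
  | m + 1 => pvRep m + 10 ^ m

def pvT : Nat → Int
  | 0 => 0
  | m + 1 => pvT m + m * 10 ^ m

theorem pvRep_mul_nine : ∀ m : Nat, 9 * pvRep m = 10 ^ m - 1 := by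
  intro m
  induction m with
  | zero => simp [pvRep]
  | succ k ih => simp [pvRep, pow_succ]; ring_nf; ring_nf at ih; omega

theorem pvT_mul : ∀ m : Nat, 81 * pvT m = (9 * m - 10) * 10 ^ m + 10 := by
  intro m
  induction m with
  | zero => simp [pvT]
  | succ k ih =>
    simp only [pvT]
    push_cast
    push_cast at ih
    ring_nf
    ring_nf at ih
    nlinarith [ih]

-- A's loop, as sum_{k<m} (fd+k)*10^(m-1-k), in the recursive form the foldl produces
def pvG : Nat → Int → Int
  | 0, _ => 0
  | m + 1, fd => fd * 10 ^ m + pvG m (fd + 1)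

theorem pv_loop_eq : ∀ (m : Nat) (c fd : Int),
    (PySem.List.pyRange ((m : Int) - 1) (-1) (-1)).foldl
      (fun (st : Int × Int) i => (st.1 + st.2 * 10 ^ i.toNat, st.2 + 1)) (c, fd)
    = (c + pvG m fd, fd + m) := by
  intro m
  induction m with
  | zero =>
    intro c fd
    rw [PySem.List.pyRange_neg_one_eq_nil (by norm_num)]
    simp [pvG]
  | succ k ih =>
    intro c fd
    have h1 : ((k + 1 : Nat) : Int) - 1 = (k : Int) := by push_cast; ring
    rw [h1, PySem.List.pyRange_neg_one_cons (by omega)]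
    simp only [List.foldl_cons, Int.toNat_natCast]
    rw [ih]
    simp only [pvG, Prod.mk.injEq]
    constructor <;> push_cast <;> ring

theorem pvG_closed : ∀ (m : Nat) (fd : Int),
    pvG m fd = (fd + m - 1) * pvRep m - pvT m := by
  intro m
  induction m with
  | zero => intro fd; simp [pvG, pvRep, pvT]
  | succ k ih =>
    intro fd
    simp only [pvG, pvRep, pvT]
    rw [ih]
    push_cast
    ring

theorem pv_floordiv_rep (m : Nat) :
    PySem.Int.floordiv (10 ^ m - 1) 9 = pvRep m := by
  rw [← pvRep_mul_nine]
  simp only [PySem.Int.floordiv]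
  exact Int.mul_fdiv_cancel_left _ (by norm_num)

theorem pv_floordiv_t (m : Nat) :
    PySem.Int.floordiv ((9 * (m : Int) - 10) * 10 ^ m + 10) 81 = pvT m := by
  rw [← pvT_mul]
  simp only [PySem.Int.floordiv]
  exact Int.mul_fdiv_cancel_left _ (by norm_num)

-- the two tail computations agree for any n ≥ 0 and any fd
theorem pv_key (n fd : Int) (hn : 0 ≤ n) :
    ((PySem.List.pyRange (n - 1) (-1) (-1)).foldl
        (fun (st : Int × Int) i => (st.1 + st.2 * 10 ^ i.toNat, st.2 + 1)) ((0 : Int), fd)).1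
    = (fd + n - 1) * PySem.Int.floordiv (10 ^ n.toNat - 1) 9
      - PySem.Int.floordiv ((9 * n - 10) * 10 ^ n.toNat + 10) 81 := by
  obtain ⟨m, rfl⟩ : ∃ m : Nat, n = (m : Int) := ⟨n.toNat, (Int.toNat_of_nonneg hn).symm⟩
  rw [pv_loop_eq]
  simp only [Int.toNat_natCast]
  rw [pv_floordiv_rep, pv_floordiv_t, pvG_closed]
  ring

theorem pv_len_nonneg (s : String) : 0 ≤ PySem.Str.len s := by
  simp [PySem.Str.len_eq]

-- ===== VERDICT (by name: the statement is the Claim_ definition above) =====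
theorem get_next_seq_spec : Claim_equal_get_next_seq := by
  intro prev is_curn_perf _ _
  unfold Spec_get_next_seq get_next_seq get_next_seq_alt
  simp only []
  set s := PySem.Int.toStr prev with hs
  set n : Int := PySem.Str.len s with hn
  set fd : Int := ((PySem.Str.pyGet? s 0).bind (fun c => PySem.Int.ofChars? [c])).getD 0 with hfd
  by_cases hc : ((is_curn_perf && PySem.Str.isIn "9" s) || decide (fd + n > 10)) = true
  · simp only [if_pos hc]
    exact pv_key (n + 1) 1 (by have := pv_len_nonneg s; omega)
  · simp only [if_neg hc]
    exact pv_key n _ (pv_len_nonneg s)
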